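-- pv_equiv track=rewrite | github.com/masebs/adventOfCode2021 | day22-3.py | findIntersects
-- ===== SOURCE A (Python) =====
-- def overlapCoord(list1, list2):
--     fromval = max((list1[0], list2[0]))
--     toval   = min((list1[-1], list2[-1]))
--     if fromval <= toval:
--         return [fromval, toval]
--     else:
--         return []
--
-- def intersectCubes(cube1, cube2):
--     if cube1 == [] or cube2 == []:
--         return []
--     else:
--         overlaps = []
--         for k in range(3):
--             o = overlapCoord(cube1[k], cube2[k])
--             if not o: # if (at least) one coord does not overlap, the cube does not overlap
--                 return []
--             overlaps.append(o)
--         return overlaps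
--
-- def findIntersects(cubes):
--     intersects = {}
--     for k in range(len(cubes)):
--         intersects[k] = []
--
--     for i, cube1 in enumerate(cubes):
--         for j, cube2 in enumerate(cubes):
--             if i == j:
--                 continue
--             if intersectCubes(cube1, cube2):
--                 intersects[i].append(j)
--     return intersects
--
-- cubes = [] # contains ranges of cubes which are on, and some inverts within them
-- ===== SOURCE B (Python) =====
-- def findIntersects(cubes):
--     # Sweep line over the x axis: sort per-cube bounding boxes by x-low, keep an
--     # active list pruned by x-high, test only x-overlapping candidate pairs.
--     n = len(cubes)
--     entries = []
--     for i, c in enumerate(cubes):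
--         if len(c) >= 3 and c[0] and c[1] and c[2]:
--             b = (c[0][0], c[0][-1], c[1][0], c[1][-1], c[2][0], c[2][-1])
--             if b[0] <= b[1] and b[2] <= b[3] and b[4] <= b[5]:
--                 entries.append((i, b))
--     entries.sort(key=lambda e: e[1][0])
--     adj = [[] for _ in range(n)]
--     active = []
--     for j, bj in entries:
--         active = [(a, ba) for a, ba in active if ba[1] >= bj[0]]
--         for a, ba in active:
--             if (max(ba[0], bj[0]) <= min(ba[1], bj[1])
--                     and max(ba[2], bj[2]) <= min(ba[3], bj[3])
--                     and max(ba[4], bj[4]) <= min(ba[5], bj[5])):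
--                 adj[a].append(j)
--                 adj[j].append(a)
--         active.append((j, bj))
--     return {k: sorted(adj[k]) for k in range(n)}
-- ===== Notes on version B (the rewrite author's own statement) =====
-- stated objective: faster
-- what changed: B replaces A's all-pairs double loop by a sweep line over the x axis: it extracts one bounding box per well-formed cube, sorts the boxes by x-low, keeps an active list pruned by x-high so only x-overlapping candidate pairs are ever tested, records each found pair symmetrically and sorts every adjacency list at the end.
import Mathlib
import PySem

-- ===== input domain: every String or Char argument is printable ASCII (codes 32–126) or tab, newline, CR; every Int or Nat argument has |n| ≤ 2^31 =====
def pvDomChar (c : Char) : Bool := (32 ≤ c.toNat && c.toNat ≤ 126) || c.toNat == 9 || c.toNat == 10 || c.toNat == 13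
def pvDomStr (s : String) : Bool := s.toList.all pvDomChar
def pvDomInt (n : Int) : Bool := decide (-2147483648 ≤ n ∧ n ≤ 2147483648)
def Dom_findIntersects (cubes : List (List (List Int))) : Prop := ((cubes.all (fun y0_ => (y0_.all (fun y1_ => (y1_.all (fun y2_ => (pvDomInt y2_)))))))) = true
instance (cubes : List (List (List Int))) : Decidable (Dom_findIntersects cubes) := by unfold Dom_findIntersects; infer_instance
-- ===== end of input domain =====

-- B replaces A's all-pairs double loop by a sweep line over the x axis (sort per-cube
-- bounding boxes by x-low, prune an active list by x-high, test only x-overlapping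
-- candidates, sort each adjacency list at the end).

-- ===== PORT A =====
def overlapCoordA (l1 l2 : List Int) : Option (List Int) :=
  match PySem.List.pyGet? l1 0, PySem.List.pyGet? l2 0,
        PySem.List.pyGet? l1 (-1), PySem.List.pyGet? l2 (-1) with
  | some a, some b, some c, some d =>
      some (if max a b ≤ min c d then [max a b, min c d] else [])
  | _, _, _, _ => none

-- the 'for k in range(3)' loop of intersectCubes, with its early returns (none = IndexError)
def intersectCubesGo (c1 c2 : List (List Int)) :
    List Int → List (List Int) → Option (List (List Int))
  | [], acc => some acc
  | k :: ks, acc =>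
    match PySem.List.pyGet? c1 k, PySem.List.pyGet? c2 k with
    | some l1, some l2 =>
      match overlapCoordA l1 l2 with
      | some o => if o = [] then some [] else intersectCubesGo c1 c2 ks (acc ++ [o])
      | none => none
    | _, _ => none

def intersectCubesA (c1 c2 : List (List Int)) : Option (List (List Int)) :=
  if c1 = [] ∨ c2 = [] then some []
  else intersectCubesGo c1 c2 [0, 1, 2] []

def findIntersects (cubes : List (List (List Int))) : List (Int × List Int) :=
  let d0 := (PySem.List.pyRange 0 (PySem.List.len cubes)).foldl
              (fun d k => d.insert k ([] : List Int)) PySem.Dict.empty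
  let res : Option (PySem.Dict Int (List Int)) :=
    (PySem.List.enumerate cubes).foldl (fun od p =>
      od.bind (fun d =>
        (PySem.List.enumerate cubes).foldl (fun od' q =>
          od'.bind (fun d' =>
            if p.1 = q.1 then some d'
            else (intersectCubesA p.2 q.2).map (fun r =>
              if r = [] then d' else d'.modify p.1 [] (· ++ [q.1])))) (some d)))
      (some d0)
  (res.getD PySem.Dict.empty).items

-- ===== PORT B =====
-- a bounding box (xlo, xhi, ylo, yhi, zlo, zhi); Python tuple -> nested product
-- b = (c[0][0], c[0][-1], c[1][0], c[1][-1], c[2][0], c[2][-1]) under the two guards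
def entryOfB (c : List (List Int)) : Option (Int × Int × Int × Int × Int × Int) :=
  if 3 ≤ c.length ∧ c.getD 0 [] ≠ [] ∧ c.getD 1 [] ≠ [] ∧ c.getD 2 [] ≠ [] then
    let b := ((c.getD 0 []).headD 0, (c.getD 0 []).getLastD 0,
              (c.getD 1 []).headD 0, (c.getD 1 []).getLastD 0,
              (c.getD 2 []).headD 0, (c.getD 2 []).getLastD 0)
    if b.1 ≤ b.2.1 ∧ b.2.2.1 ≤ b.2.2.2.1 ∧ b.2.2.2.2.1 ≤ b.2.2.2.2.2 then some b else none
  else none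

-- the three-axis max/min comparison of B's inner test
def bOverlap (b1 b2 : Int × Int × Int × Int × Int × Int) : Bool :=
  decide (max b1.1 b2.1 ≤ min b1.2.1 b2.2.1) &&
  decide (max b1.2.2.1 b2.2.2.1 ≤ min b1.2.2.2.1 b2.2.2.2.1) &&
  decide (max b1.2.2.2.2.1 b2.2.2.2.2.1 ≤ min b1.2.2.2.2.2 b2.2.2.2.2.2)

-- one step of the sweep: prune active by x-high, test candidates, record both ways, add e
def sweepStep (st : List (Int × (Int × Int × Int × Int × Int × Int)) × List (List Int))
    (e : Int × (Int × Int × Int × Int × Int × Int)) :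
    List (Int × (Int × Int × Int × Int × Int × Int)) × List (List Int) :=
  let act := st.1.filter (fun p => decide (p.2.2.1 ≥ e.2.1))
  let adj := act.foldl (fun adj p =>
      if bOverlap p.2 e.2 then
        let a1 := adj.set p.1.toNat (adj.getD p.1.toNat [] ++ [e.1])
        a1.set e.1.toNat (a1.getD e.1.toNat [] ++ [p.1])
      else adj) st.2
  (act ++ [e], adj)

def findIntersects_alt (cubes : List (List (List Int))) : List (Int × List Int) :=
  let n := PySem.List.len cubes
  let entries := (PySem.List.enumerate cubes).foldl (fun es p =>
      match entryOfB p.2 with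
      | some b => es ++ [(p.1, b)]
      | none => es) []
  let entriesS := PySem.List.sorted entries (fun e => e.2.1) false
  let st := entriesS.foldl sweepStep ([], List.replicate cubes.length [])
  ((PySem.List.pyRange 0 n).foldl (fun d k =>
      d.insert k (PySem.List.sorted (PySem.List.pyGetD st.2 k []) (fun x => x) false))
    PySem.Dict.empty).items

-- ===== PRECONDITION & SPEC =====
-- axis k of both cubes is indexable and nonempty (else A's overlapCoord raises IndexError)
def axOkB (c1 c2 : List (List Int)) (k : Nat) : Bool :=
  decide (k < c1.length) && decide (k < c2.length) &&
  decide (c1.getD k [] ≠ []) && decide (c2.getD k [] ≠ [])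

-- axis k of the two cubes overlaps (first/last entries), so A goes on to the next axis
def axOverB (c1 c2 : List (List Int)) (k : Nat) : Bool :=
  decide (max ((c1.getD k []).headD 0) ((c2.getD k []).headD 0) ≤
    min ((c1.getD k []).getLastD 0) ((c2.getD k []).getLastD 0))

-- A's axis walk over a pair of nonempty cubes indexes safely (early exit on a missing overlap)
def SafePair (c1 c2 : List (List Int)) : Bool :=
  axOkB c1 c2 0 && (!axOverB c1 c2 0 || (axOkB c1 c2 1 && (!axOverB c1 c2 1 || axOkB c1 c2 2)))

-- Pre_ excludes exactly the inputs on which A raises IndexError: some compared pair of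
-- nonempty cubes (at distinct indices) reaches a missing or empty axis list during A's walk.
def Pre_findIntersects (cubes : List (List (List Int))) : Prop :=
  ∀ i ∈ List.range cubes.length, ∀ j ∈ List.range cubes.length, i ≠ j →
    cubes.getD i [] ≠ [] → cubes.getD j [] ≠ [] →
      SafePair (cubes.getD i []) (cubes.getD j []) = true
instance (cubes : List (List (List Int))) : Decidable (Pre_findIntersects cubes) := by
  unfold Pre_findIntersects; infer_instance

def pvWitness_findIntersects : List (List (List Int)) :=
  [[[0, 9], [0, 9], [0, 9]], [[5, 15], [5, 15], [5, 15]], [[20, 30], [0, 9], [0, 9]], []]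

def Spec_findIntersects (cubes : List (List (List Int))) (out : List (Int × List Int)) : Prop :=
  out = findIntersects_alt cubes
instance (cubes : List (List (List Int))) (out : List (Int × List Int)) :
    Decidable (Spec_findIntersects cubes out) := by unfold Spec_findIntersects; infer_instance

-- ===== CLAIM (what is proved, stated in full; the proofs are below) =====
def Claim_equal_findIntersects : Prop :=
  ∀ (cubes : List (List (List Int))), Dom_findIntersects cubes → Pre_findIntersects cubes →
    Spec_findIntersects cubes (findIntersects cubes)

-- ===== LEMMAS AND PROOFS =====

-- === A side: the pairwise overlap test as a boolean on bounding boxes ===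
def boxOf (c : List (List Int)) : Option ((Int × Int) × (Int × Int) × (Int × Int)) :=
  if 3 ≤ c.length ∧ c.getD 0 [] ≠ [] ∧ c.getD 1 [] ≠ [] ∧ c.getD 2 [] ≠ [] then
    some (((c.getD 0 []).headD 0, (c.getD 0 []).getLastD 0),
          ((c.getD 1 []).headD 0, (c.getD 1 []).getLastD 0),
          ((c.getD 2 []).headD 0, (c.getD 2 []).getLastD 0))
  else none

def boxesOverlap (b1 b2 : (Int × Int) × (Int × Int) × (Int × Int)) : Bool :=
  decide (max b1.1.1 b2.1.1 ≤ min b1.1.2 b2.1.2) &&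
  decide (max b1.2.1.1 b2.2.1.1 ≤ min b1.2.1.2 b2.2.1.2) &&
  decide (max b1.2.2.1 b2.2.2.1 ≤ min b1.2.2.2 b2.2.2.2)

def aOv (c1 c2 : List (List Int)) : Bool :=
  match boxOf c1, boxOf c2 with
  | some b1, some b2 => boxesOverlap b1 b2
  | _, _ => false

theorem pyGet?_nat {α : Type} (l : List α) (k : Nat) (h : k < l.length) :
    PySem.List.pyGet? l (k : Int) = some l[k] := by
  simp only [PySem.List.pyGet?, PySem.List.pyIdx?]
  rw [if_pos (by omega), if_pos (by exact_mod_cast h)]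
  simp [List.getElem?_eq_getElem h]

theorem pyGet?_zero (l : List Int) (h : l ≠ []) :
    PySem.List.pyGet? l 0 = some (l.headD 0) := by
  cases l with
  | nil => simp at h
  | cons x xs => simp [PySem.List.pyGet?, PySem.List.pyIdx?]

theorem pyGet?_neg_one (l : List Int) (h : l ≠ []) :
    PySem.List.pyGet? l (-1) = some (l.getLastD 0) := by
  cases l with
  | nil => simp at h
  | cons x xs =>
    simp [PySem.List.pyGet?, PySem.List.pyIdx?, List.getLastD_eq_getLast?,
      List.getLast?_eq_getElem?]

theorem overlapCoordA_eval (l1 l2 : List Int) (h1 : l1 ≠ []) (h2 : l2 ≠ []) :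
    overlapCoordA l1 l2 =
      some (if max (l1.headD 0) (l2.headD 0) ≤ min (l1.getLastD 0) (l2.getLastD 0) then
              [max (l1.headD 0) (l2.headD 0), min (l1.getLastD 0) (l2.getLastD 0)]
            else []) := by
  unfold overlapCoordA
  rw [pyGet?_zero l1 h1, pyGet?_zero l2 h2, pyGet?_neg_one l1 h1, pyGet?_neg_one l2 h2]

theorem go_cons (c1 c2 : List (List Int)) (k : Int) (ks : List Int) (acc : List (List Int))
    (l1 l2 : List Int) (h1 : PySem.List.pyGet? c1 k = some l1)
    (h2 : PySem.List.pyGet? c2 k = some l2) (o : List Int)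
    (ho : overlapCoordA l1 l2 = some o) :
    intersectCubesGo c1 c2 (k :: ks) acc =
      if o = [] then some [] else intersectCubesGo c1 c2 ks (acc ++ [o]) := by
  simp only [intersectCubesGo, h1, h2, ho]

-- aOv is false as soon as one axis fails to overlap
theorem aOv_false0 (c1 c2 : List (List Int))
    (h : ¬ max ((c1.getD 0 []).headD 0) ((c2.getD 0 []).headD 0) ≤
      min ((c1.getD 0 []).getLastD 0) ((c2.getD 0 []).getLastD 0)) : aOv c1 c2 = false := by
  unfold aOv boxOf
  split_ifs <;>
    first
      | rfl
      | simp only [boxesOverlap, decide_eq_false h, Bool.false_and]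

theorem aOv_false1 (c1 c2 : List (List Int))
    (h : ¬ max ((c1.getD 1 []).headD 0) ((c2.getD 1 []).headD 0) ≤
      min ((c1.getD 1 []).getLastD 0) ((c2.getD 1 []).getLastD 0)) : aOv c1 c2 = false := by
  unfold aOv boxOf
  split_ifs <;>
    first
      | rfl
      | simp only [boxesOverlap, decide_eq_false h, Bool.false_and, Bool.and_false]

-- A's pair test returns a value whose truthiness is exactly aOv, on Pre_-safe pairs
theorem ic_some (c1 c2 : List (List Int))
    (h : c1 = [] ∨ c2 = [] ∨ SafePair c1 c2 = true) :
    ∃ r, intersectCubesA c1 c2 = some r ∧ ((r = []) ↔ (aOv c1 c2 = false)) := by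
  rcases h with rfl | h
  · exact ⟨[], by simp [intersectCubesA], by simp [aOv, boxOf]⟩
  rcases h with rfl | h
  · refine ⟨[], by simp [intersectCubesA], ?_⟩
    have hb : boxOf [] = none := by simp [boxOf]
    cases hb1 : boxOf c1 <;> simp [aOv, hb1, hb]
  have hs : axOkB c1 c2 0 = true ∧ (axOverB c1 c2 0 = false ∨ (axOkB c1 c2 1 = true ∧
      (axOverB c1 c2 1 = false ∨ axOkB c1 c2 2 = true))) := by
    simpa [SafePair, Bool.and_eq_true, Bool.or_eq_true, Bool.not_eq_true'] using h
  obtain ⟨h0, hrest⟩ := hs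
  obtain ⟨hl10, hl20, ha1, ha2⟩ :
      0 < c1.length ∧ 0 < c2.length ∧ c1.getD 0 [] ≠ [] ∧ c2.getD 0 [] ≠ [] := by
    simpa [axOkB, Bool.and_eq_true, decide_eq_true_eq, and_assoc] using h0
  have hne1 : c1 ≠ [] := by intro e; rw [e] at hl10; simp at hl10
  have hne2 : c2 ≠ [] := by intro e; rw [e] at hl20; simp at hl20
  have g10 : PySem.List.pyGet? c1 (0 : Int) = some (c1.getD 0 []) := by
    rw [List.getD_eq_getElem c1 [] hl10]
    exact_mod_cast pyGet?_nat c1 0 hl10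
  have g20 : PySem.List.pyGet? c2 (0 : Int) = some (c2.getD 0 []) := by
    rw [List.getD_eq_getElem c2 [] hl20]
    exact_mod_cast pyGet?_nat c2 0 hl20
  have hic : intersectCubesA c1 c2 = intersectCubesGo c1 c2 [0, 1, 2] [] := by
    unfold intersectCubesA
    rw [if_neg (by simp [hne1, hne2])]
  have ho0 := overlapCoordA_eval (c1.getD 0 []) (c2.getD 0 []) ha1 ha2
  by_cases hP0 : max ((c1.getD 0 []).headD 0) ((c2.getD 0 []).headD 0) ≤
      min ((c1.getD 0 []).getLastD 0) ((c2.getD 0 []).getLastD 0)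
  case neg =>
    refine ⟨[], ?_, ?_⟩
    · rw [hic, go_cons c1 c2 0 [1, 2] [] _ _ g10 g20 _ ho0, if_neg hP0, if_pos rfl]
    · rw [aOv_false0 c1 c2 hP0]
      simp
  case pos =>
  have h1all : axOkB c1 c2 1 = true ∧ (axOverB c1 c2 1 = false ∨ axOkB c1 c2 2 = true) := by
    rcases hrest with hmiss | hrest
    · exact absurd hP0 (by simpa [axOverB, decide_eq_false_iff_not] using hmiss)
    · exact hrest
  obtain ⟨h1, hrest1⟩ := h1all
  obtain ⟨hl11, hl21, hb1, hb2⟩ :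
      1 < c1.length ∧ 1 < c2.length ∧ c1.getD 1 [] ≠ [] ∧ c2.getD 1 [] ≠ [] := by
    simpa [axOkB, Bool.and_eq_true, decide_eq_true_eq, and_assoc] using h1
  have g11 : PySem.List.pyGet? c1 (1 : Int) = some (c1.getD 1 []) := by
    rw [List.getD_eq_getElem c1 [] hl11]
    exact_mod_cast pyGet?_nat c1 1 hl11
  have g21 : PySem.List.pyGet? c2 (1 : Int) = some (c2.getD 1 []) := by
    rw [List.getD_eq_getElem c2 [] hl21]
    exact_mod_cast pyGet?_nat c2 1 hl21
  have ho1 := overlapCoordA_eval (c1.getD 1 []) (c2.getD 1 []) hb1 hb2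
  by_cases hP1 : max ((c1.getD 1 []).headD 0) ((c2.getD 1 []).headD 0) ≤
      min ((c1.getD 1 []).getLastD 0) ((c2.getD 1 []).getLastD 0)
  case neg =>
    refine ⟨[], ?_, ?_⟩
    · rw [hic, go_cons c1 c2 0 [1, 2] [] _ _ g10 g20 _ ho0, if_pos hP0,
        if_neg (by simp), go_cons c1 c2 1 [2] _ _ _ g11 g21 _ ho1, if_neg hP1, if_pos rfl]
    · rw [aOv_false1 c1 c2 hP1]
      simp
  case pos =>
  have h2 : axOkB c1 c2 2 = true := by
    rcases hrest1 with hmiss | h2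
    · exact absurd hP1 (by simpa [axOverB, decide_eq_false_iff_not] using hmiss)
    · exact h2
  obtain ⟨hl12, hl22, hc1', hc2'⟩ :
      2 < c1.length ∧ 2 < c2.length ∧ c1.getD 2 [] ≠ [] ∧ c2.getD 2 [] ≠ [] := by
    simpa [axOkB, Bool.and_eq_true, decide_eq_true_eq, and_assoc] using h2
  have g12 : PySem.List.pyGet? c1 (2 : Int) = some (c1.getD 2 []) := by
    rw [List.getD_eq_getElem c1 [] hl12]
    exact_mod_cast pyGet?_nat c1 2 hl12
  have g22 : PySem.List.pyGet? c2 (2 : Int) = some (c2.getD 2 []) := by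
    rw [List.getD_eq_getElem c2 [] hl22]
    exact_mod_cast pyGet?_nat c2 2 hl22
  have ho2 := overlapCoordA_eval (c1.getD 2 []) (c2.getD 2 []) hc1' hc2'
  have hbox1 : boxOf c1 = some (((c1.getD 0 []).headD 0, (c1.getD 0 []).getLastD 0),
      ((c1.getD 1 []).headD 0, (c1.getD 1 []).getLastD 0),
      ((c1.getD 2 []).headD 0, (c1.getD 2 []).getLastD 0)) := by
    unfold boxOf
    rw [if_pos ⟨by omega, ha1, hb1, hc1'⟩]
  have hbox2 : boxOf c2 = some (((c2.getD 0 []).headD 0, (c2.getD 0 []).getLastD 0),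
      ((c2.getD 1 []).headD 0, (c2.getD 1 []).getLastD 0),
      ((c2.getD 2 []).headD 0, (c2.getD 2 []).getLastD 0)) := by
    unfold boxOf
    rw [if_pos ⟨by omega, ha2, hb2, hc2'⟩]
  have haov : aOv c1 c2 =
      (decide (max ((c1.getD 0 []).headD 0) ((c2.getD 0 []).headD 0) ≤
          min ((c1.getD 0 []).getLastD 0) ((c2.getD 0 []).getLastD 0)) &&
       decide (max ((c1.getD 1 []).headD 0) ((c2.getD 1 []).headD 0) ≤
          min ((c1.getD 1 []).getLastD 0) ((c2.getD 1 []).getLastD 0)) &&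
       decide (max ((c1.getD 2 []).headD 0) ((c2.getD 2 []).headD 0) ≤
          min ((c1.getD 2 []).getLastD 0) ((c2.getD 2 []).getLastD 0))) := by
    simp [aOv, hbox1, hbox2, boxesOverlap]
  by_cases hP2 : max ((c1.getD 2 []).headD 0) ((c2.getD 2 []).headD 0) ≤
      min ((c1.getD 2 []).getLastD 0) ((c2.getD 2 []).getLastD 0)
  case neg =>
    refine ⟨[], ?_, ?_⟩
    · rw [hic, go_cons c1 c2 0 [1, 2] [] _ _ g10 g20 _ ho0, if_pos hP0,
        if_neg (by simp), go_cons c1 c2 1 [2] _ _ _ g11 g21 _ ho1, if_pos hP1,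
        if_neg (by simp), go_cons c1 c2 2 [] _ _ _ g12 g22 _ ho2, if_neg hP2, if_pos rfl]
    · rw [haov, decide_eq_false hP2]
      simp
  case pos =>
    refine ⟨[[max ((c1.getD 0 []).headD 0) ((c2.getD 0 []).headD 0),
              min ((c1.getD 0 []).getLastD 0) ((c2.getD 0 []).getLastD 0)],
             [max ((c1.getD 1 []).headD 0) ((c2.getD 1 []).headD 0),
              min ((c1.getD 1 []).getLastD 0) ((c2.getD 1 []).getLastD 0)],
             [max ((c1.getD 2 []).headD 0) ((c2.getD 2 []).headD 0),
              min ((c1.getD 2 []).getLastD 0) ((c2.getD 2 []).getLastD 0)]], ?_, ?_⟩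
    · rw [hic, go_cons c1 c2 0 [1, 2] [] _ _ g10 g20 _ ho0, if_pos hP0,
        if_neg (by simp), go_cons c1 c2 1 [2] _ _ _ g11 g21 _ ho1, if_pos hP1,
        if_neg (by simp), go_cons c1 c2 2 [] _ _ _ g12 g22 _ ho2, if_pos hP2,
        if_neg (by simp)]
      simp [intersectCubesGo]
    · refine iff_of_false (by simp) ?_
      rw [haov, decide_eq_true hP0, decide_eq_true hP1, decide_eq_true hP2]
      simp

-- === A side: reduce the Option-threaded folds to pure folds ===
def innerStep (i : Int) (c1 : List (List Int)) (d : PySem.Dict Int (List Int))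
    (q : Int × List (List Int)) : PySem.Dict Int (List Int) :=
  if i = q.1 then d else if aOv c1 q.2 then d.modify i [] (· ++ [q.1]) else d

def innerP (i : Int) (c1 : List (List Int)) (l : List (Int × List (List Int)))
    (d : PySem.Dict Int (List Int)) : PySem.Dict Int (List Int) :=
  l.foldl (innerStep i c1) d

def outerP (cubes : List (List (List Int))) (l : List (Int × List (List Int)))
    (d : PySem.Dict Int (List Int)) : PySem.Dict Int (List Int) :=
  l.foldl (fun d p => innerP p.1 p.2 (PySem.List.enumerate cubes) d) d

theorem inner_fold_some (i : Int) (c1 : List (List Int))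
    (l : List (Int × List (List Int)))
    (hl : ∀ q ∈ l, i = q.1 ∨ c1 = [] ∨ q.2 = [] ∨ SafePair c1 q.2 = true)
    (d : PySem.Dict Int (List Int)) :
    l.foldl (fun od' q => od'.bind (fun d' =>
        if i = q.1 then some d'
        else (intersectCubesA c1 q.2).map (fun r =>
          if r = [] then d' else d'.modify i [] (· ++ [q.1])))) (some d)
      = some (innerP i c1 l d) := by
  induction l generalizing d with
  | nil => simp [innerP]
  | cons q l ih =>
    have hstep : ((some d).bind (fun d' =>
        if i = q.1 then some d'
        else (intersectCubesA c1 q.2).map (fun r =>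
          if r = [] then d' else d'.modify i [] (· ++ [q.1]))))
        = some (innerStep i c1 d q) := by
      rw [Option.bind_some]
      unfold innerStep
      by_cases h1 : i = q.1
      · simp [h1]
      · obtain ⟨r, hr, hiff⟩ := ic_some c1 q.2 ((hl q (by simp)).resolve_left h1)
        rw [hr]
        by_cases h2 : aOv c1 q.2 = true
        · have hrne : ¬ r = [] := by simp [hiff, h2]
          simp [h1, h2, hrne]
        · have hre : r = [] := hiff.mpr (by simpa using h2)
          simp [h1, h2, hre]
    rw [List.foldl_cons, hstep, ih (fun q hq => hl q (List.mem_cons_of_mem _ hq))]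
    rfl

theorem outer_fold_some (cubes : List (List (List Int)))
    (l : List (Int × List (List Int)))
    (hl : ∀ p ∈ l, ∀ q ∈ PySem.List.enumerate cubes,
      p.1 = q.1 ∨ p.2 = [] ∨ q.2 = [] ∨ SafePair p.2 q.2 = true)
    (d : PySem.Dict Int (List Int)) :
    l.foldl (fun od p => od.bind (fun d =>
        (PySem.List.enumerate cubes).foldl (fun od' q => od'.bind (fun d' =>
          if p.1 = q.1 then some d'
          else (intersectCubesA p.2 q.2).map (fun r =>
            if r = [] then d' else d'.modify p.1 [] (· ++ [q.1])))) (some d))) (some d)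
      = some (outerP cubes l d) := by
  induction l generalizing d with
  | nil => simp [outerP]
  | cons p l ih =>
    rw [List.foldl_cons, Option.bind_some,
      inner_fold_some p.1 p.2 (PySem.List.enumerate cubes) (hl p (by simp)) d,
      ih (fun q hq => hl q (List.mem_cons_of_mem _ hq))]
    rfl

theorem innerP_getD (i : Int) (c1 : List (List Int)) (l : List (Int × List (List Int)))
    (d : PySem.Dict Int (List Int)) (k : Int) :
    (innerP i c1 l d).getD k [] =
      d.getD k [] ++ (if k = i then
        (l.filter (fun q => decide (i ≠ q.1) && aOv c1 q.2)).map (·.1) else []) := by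
  induction l generalizing d with
  | nil => simp [innerP]
  | cons q l ih =>
    simp only [innerP, List.foldl_cons] at *
    rw [ih]
    by_cases h1 : i = q.1
    · have hf : List.filter (fun q' => decide (i ≠ q'.1) && aOv c1 q'.2) (q :: l)
          = List.filter (fun q' => decide (i ≠ q'.1) && aOv c1 q'.2) l := by
        rw [List.filter_cons, if_neg]
        simp [h1]
      rw [show innerStep i c1 d q = d from by simp [innerStep, h1], hf]
    · by_cases h2 : aOv c1 q.2 = true
      · have hf : List.filter (fun q' => decide (i ≠ q'.1) && aOv c1 q'.2) (q :: l)
            = q :: List.filter (fun q' => decide (i ≠ q'.1) && aOv c1 q'.2) l := by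
          rw [List.filter_cons, if_pos]
          simp [h1, h2]
        rw [show innerStep i c1 d q = d.modify i [] (· ++ [q.1]) from by
          simp [innerStep, h1, h2], hf]
        by_cases hk : k = i
        · subst hk
          rw [PySem.Dict.getD_modify_self d k [] (fun x => x ++ [q.1]), if_pos rfl, if_pos rfl]
          simp [List.append_assoc]
        · rw [PySem.Dict.getD_modify_of_ne d [] (fun x => x ++ [q.1]) hk, if_neg hk, if_neg hk]
      · have hf : List.filter (fun q' => decide (i ≠ q'.1) && aOv c1 q'.2) (q :: l)
            = List.filter (fun q' => decide (i ≠ q'.1) && aOv c1 q'.2) l := by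
          rw [List.filter_cons, if_neg]
          simp [h2]
        rw [show innerStep i c1 d q = d from by simp [innerStep, h1, h2], hf]

theorem innerP_keys (i : Int) (c1 : List (List Int)) (l : List (Int × List (List Int)))
    (d : PySem.Dict Int (List Int)) (h : i ∈ d.keys) :
    (innerP i c1 l d).keys = d.keys := by
  induction l generalizing d with
  | nil => simp [innerP]
  | cons q l ih =>
    simp only [innerP, List.foldl_cons] at *
    by_cases h1 : i = q.1
    · rw [show innerStep i c1 d q = d from by simp [innerStep, h1]]; exact ih d h
    · by_cases h2 : aOv c1 q.2 = true
      · rw [show innerStep i c1 d q = d.modify i [] (· ++ [q.1]) from by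
          simp [innerStep, h1, h2]]
        have hc : (d.modify i [] (· ++ [q.1])).keys = d.keys := by
          rw [PySem.Dict.keys_modify, PySem.Dict.keys_insert_of_contains _ _
            ((PySem.Dict.contains_iff_mem_keys d i).mpr h)]
        rw [ih _ (by rw [hc]; exact h), hc]
      · rw [show innerStep i c1 d q = d from by simp [innerStep, h1, h2]]; exact ih d h

theorem outerP_getD (cubes : List (List (List Int))) (l : List (Int × List (List Int)))
    (d : PySem.Dict Int (List Int)) (k : Int) :
    (outerP cubes l d).getD k [] =
      d.getD k [] ++ (l.filter (fun p => decide (p.1 = k))).flatMap (fun p =>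
        ((PySem.List.enumerate cubes).filter (fun q => decide (p.1 ≠ q.1) && aOv p.2 q.2)).map (·.1)) := by
  induction l generalizing d with
  | nil => simp [outerP]
  | cons p l ih =>
    simp only [outerP, List.foldl_cons] at *
    rw [ih, innerP_getD, List.filter_cons]
    by_cases hp : p.1 = k
    · simp [hp, List.append_assoc]
    · have hk : ¬ k = p.1 := fun e => hp e.symm
      simp [hp, hk]

theorem outerP_keys (cubes : List (List (List Int))) (l : List (Int × List (List Int)))
    (d : PySem.Dict Int (List Int)) (h : ∀ p ∈ l, p.1 ∈ d.keys) :
    (outerP cubes l d).keys = d.keys := by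
  induction l generalizing d with
  | nil => simp [outerP]
  | cons p l ih =>
    simp only [outerP, List.foldl_cons] at *
    have hk := innerP_keys p.1 p.2 (PySem.List.enumerate cubes) d (h p (by simp))
    rw [ih _ (fun q hq => by rw [hk]; exact h q (List.mem_cons_of_mem _ hq)), hk]

-- the per-index value A computes
def AVal (cubes : List (List (List Int))) (k : Int) : List Int :=
  (PySem.List.pyRange 0 (PySem.List.len cubes)).filter (fun j =>
    decide (k ≠ j) && aOv (PySem.List.pyGetD cubes k []) (PySem.List.pyGetD cubes j []))

theorem nodup_filter_eq_singleton {α : Type} [DecidableEq α] (l : List α) (h : l.Nodup)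
    (k : α) (hk : k ∈ l) : l.filter (fun x => decide (x = k)) = [k] := by
  induction l with
  | nil => simp at hk
  | cons y ys ih =>
    simp only [List.nodup_cons] at h
    rcases List.mem_cons.1 hk with rfl | hm
    · have hnil : ys.filter (fun x => decide (x = k)) = [] := by
        simp only [List.filter_eq_nil_iff, decide_eq_true_eq]
        exact fun a ha e => h.1 (e ▸ ha)
      simp [hnil]
    · rw [List.filter_cons]
      have hne : ¬ (y = k) := fun e => h.1 (e ▸ hm)
      simp [hne, ih h.2 hm]

theorem A_char (cubes : List (List (List Int))) (hPre : Pre_findIntersects cubes) :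
    findIntersects cubes =
      (PySem.List.pyRange 0 (PySem.List.len cubes)).map (fun k => (k, AVal cubes k)) := by
  have hpair : ∀ p ∈ PySem.List.enumerate cubes, ∀ q ∈ PySem.List.enumerate cubes,
      p.1 = q.1 ∨ p.2 = [] ∨ q.2 = [] ∨ SafePair p.2 q.2 = true := by
    intro p hp q hq
    obtain ⟨i, hi, rfl⟩ := (PySem.List.mem_enumerate_iff cubes 0 p).mp hp
    obtain ⟨jq, hjq, rfl⟩ := (PySem.List.mem_enumerate_iff cubes 0 q).mp hq
    by_cases hij : i = jq
    · left
      simp [hij]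
    · by_cases he1 : cubes[i] = []
      · right; left; exact he1
      · by_cases he2 : cubes[jq] = []
        · right; right; left; exact he2
        · right; right; right
          have h := hPre i (List.mem_range.mpr hi) jq (List.mem_range.mpr hjq) hij
          rw [List.getD_eq_getElem cubes [] hi, List.getD_eq_getElem cubes [] hjq] at h
          exact h he1 he2
  have hfresh : ∀ a ∈ PySem.List.pyRange 0 (PySem.List.len cubes),
      (PySem.Dict.empty : PySem.Dict Int (List Int)).contains a = false := fun a _ => by simp
  have hnd : (PySem.List.pyRange 0 (PySem.List.len cubes)).Nodup :=
    PySem.List.nodup_pyRange_one 0 _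
  have hd0items : ((PySem.List.pyRange 0 (PySem.List.len cubes)).foldl
      (fun d k => d.insert k ([] : List Int)) PySem.Dict.empty).items
      = (PySem.List.pyRange 0 (PySem.List.len cubes)).map (fun k => (k, ([] : List Int))) := by
    simpa using PySem.Dict.items_foldl_insert_fresh (PySem.List.pyRange 0 (PySem.List.len cubes))
      (fun x => x) (fun _ => ([] : List Int)) PySem.Dict.empty hfresh (by simpa using hnd)
  set d0 := (PySem.List.pyRange 0 (PySem.List.len cubes)).foldl
      (fun d k => d.insert k ([] : List Int)) PySem.Dict.empty with hd0
  have hkd0 : d0.keys = PySem.List.pyRange 0 (PySem.List.len cubes) := by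
    simp only [PySem.Dict.keys, hd0items, List.map_map]
    simp [Function.comp_def]
  have hd0getD : ∀ k : Int, d0.getD k [] = [] := by
    intro k
    by_cases hck : d0.contains k = true
    · have hmemk : k ∈ d0.keys := (PySem.Dict.contains_iff_mem_keys d0 k).mp hck
      have hmem : (k, ([] : List Int)) ∈ d0.items := by
        rw [hd0items]
        rw [hkd0] at hmemk
        exact List.mem_map.mpr ⟨k, hmemk, rfl⟩
      exact PySem.Dict.getD_of_mem_items d0 hmem (by rw [hkd0]; exact hnd) []
    · exact PySem.Dict.getD_of_not_contains d0 [] (by simpa using hck)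
  have hres : findIntersects cubes = (outerP cubes (PySem.List.enumerate cubes) d0).items := by
    show ((((PySem.List.enumerate cubes).foldl (fun od p =>
      od.bind (fun d =>
        (PySem.List.enumerate cubes).foldl (fun od' q =>
          od'.bind (fun d' =>
            if p.1 = q.1 then some d'
            else (intersectCubesA p.2 q.2).map (fun r =>
              if r = [] then d' else d'.modify p.1 [] (· ++ [q.1])))) (some d)))
      (some d0)).getD PySem.Dict.empty).items)
      = (outerP cubes (PySem.List.enumerate cubes) d0).items
    rw [outer_fold_some cubes (PySem.List.enumerate cubes) hpair d0]
    rfl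
  have hkeys : (outerP cubes (PySem.List.enumerate cubes) d0).keys = d0.keys := by
    apply outerP_keys
    intro p hp
    obtain ⟨kk, hkk, rfl⟩ := (PySem.List.mem_enumerate_iff cubes 0 p).mp hp
    rw [hkd0]
    refine PySem.List.mem_pyRange_one.mpr ⟨by omega, ?_⟩
    rw [PySem.List.len_eq]
    omega
  rw [hres, PySem.Dict.items_eq_map_keys _ (by rw [hkeys, hkd0]; exact hnd) [], hkeys, hkd0]
  apply List.map_congr_left
  intro k hk
  have hk' : (0 : Int) ≤ k ∧ k < PySem.List.len cubes := PySem.List.mem_pyRange_one.mp hk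
  congr 1
  rw [outerP_getD, hd0getD]
  have henum_eq := PySem.List.enumerate_eq_map_pyRange cubes ([] : List (List Int))
  have hfmap : (PySem.List.enumerate cubes).filter (fun p => decide (p.1 = k))
      = [(k, PySem.List.pyGetD cubes k [])] := by
    rw [henum_eq, List.filter_map]
    have hcomp : ((fun (p : Int × List (List Int)) => decide (p.1 = k)) ∘
        (fun j => (j, PySem.List.pyGetD cubes j []))) = fun j => decide (j = k) := rfl
    rw [hcomp, nodup_filter_eq_singleton _ hnd k hk]
    rfl
  rw [hfmap]
  simp only [List.flatMap_cons, List.flatMap_nil, List.append_nil, List.nil_append]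
  rw [henum_eq, List.filter_map]
  have hcomp2 : ((fun (q : Int × List (List Int)) =>
      decide (k ≠ q.1) && aOv (PySem.List.pyGetD cubes k []) q.2) ∘
      (fun j => (j, PySem.List.pyGetD cubes j [])))
      = fun j => decide (k ≠ j) && aOv (PySem.List.pyGetD cubes k [])
          (PySem.List.pyGetD cubes j []) := rfl
  rw [hcomp2, List.map_map]
  have hcomp3 : ((fun (x : Int × List (List Int)) => x.1) ∘
      (fun j => (j, PySem.List.pyGetD cubes j []))) = fun (j : Int) => j := rfl
  rw [hcomp3]
  unfold AVal
  simp

-- === B side: bridge between A's pair test and B's flat boxes ===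
abbrev PBox := Int × Int × Int × Int × Int × Int

-- B's pair test phrased through entryOfB (proper boxes only)
def eOv (c1 c2 : List (List Int)) : Bool :=
  match entryOfB c1, entryOfB c2 with
  | some b1, some b2 => bOverlap b1 b2
  | _, _ => false

theorem bOverlap_comm (b1 b2 : PBox) : bOverlap b1 b2 = bOverlap b2 b1 := by
  simp only [bOverlap]
  rw [max_comm, min_comm, max_comm b1.2.2.1, min_comm b1.2.2.2.1, max_comm b1.2.2.2.2.1,
    min_comm b1.2.2.2.2.2]

theorem bo_proper (b1 b2 : (Int × Int) × (Int × Int) × (Int × Int))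
    (h : boxesOverlap b1 b2 = true) :
    (b1.1.1 ≤ b1.1.2 ∧ b1.2.1.1 ≤ b1.2.1.2 ∧ b1.2.2.1 ≤ b1.2.2.2) ∧
    (b2.1.1 ≤ b2.1.2 ∧ b2.2.1.1 ≤ b2.2.1.2 ∧ b2.2.2.1 ≤ b2.2.2.2) := by
  simp only [boxesOverlap, Bool.and_eq_true, decide_eq_true_eq] at h
  obtain ⟨⟨h1, h2⟩, h3⟩ := h
  refine ⟨⟨?_, ?_, ?_⟩, ?_, ?_, ?_⟩ <;>
    [exact le_trans (le_max_left _ _) (le_trans h1 (min_le_left _ _));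
     exact le_trans (le_max_left _ _) (le_trans h2 (min_le_left _ _));
     exact le_trans (le_max_left _ _) (le_trans h3 (min_le_left _ _));
     exact le_trans (le_max_right _ _) (le_trans h1 (min_le_right _ _));
     exact le_trans (le_max_right _ _) (le_trans h2 (min_le_right _ _));
     exact le_trans (le_max_right _ _) (le_trans h3 (min_le_right _ _))]

theorem entry_of_box_none (c : List (List Int)) (h : boxOf c = none) : entryOfB c = none := by
  unfold boxOf at h
  unfold entryOfB
  by_cases hg : 3 ≤ c.length ∧ c.getD 0 [] ≠ [] ∧ c.getD 1 [] ≠ [] ∧ c.getD 2 [] ≠ []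
  · rw [if_pos hg] at h
    exact absurd h (by simp)
  · rw [if_neg hg]

theorem entry_of_box_some (c : List (List Int)) (b : (Int × Int) × (Int × Int) × (Int × Int))
    (h : boxOf c = some b) :
    entryOfB c = if b.1.1 ≤ b.1.2 ∧ b.2.1.1 ≤ b.2.1.2 ∧ b.2.2.1 ≤ b.2.2.2 then
      some (b.1.1, b.1.2, b.2.1.1, b.2.1.2, b.2.2.1, b.2.2.2) else none := by
  unfold boxOf at h
  unfold entryOfB
  by_cases hg : 3 ≤ c.length ∧ c.getD 0 [] ≠ [] ∧ c.getD 1 [] ≠ [] ∧ c.getD 2 [] ≠ []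
  · rw [if_pos hg] at h
    rw [if_pos hg]
    obtain rfl := Option.some.inj h
    rfl
  · rw [if_neg hg] at h
    simp at h

theorem eOv_none_left (c1 c2 : List (List Int)) (h : entryOfB c1 = none) :
    eOv c1 c2 = false := by
  unfold eOv
  rw [h]

theorem eOv_none_right (c1 c2 : List (List Int)) (h : entryOfB c2 = none) :
    eOv c1 c2 = false := by
  unfold eOv
  rw [h]
  cases entryOfB c1 <;> rfl

theorem aOv_eq_eOv (c1 c2 : List (List Int)) : aOv c1 c2 = eOv c1 c2 := by
  cases hb1 : boxOf c1 with
  | none =>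
    rw [eOv_none_left c1 c2 (entry_of_box_none c1 hb1)]
    simp [aOv, hb1]
  | some b1 =>
    cases hb2 : boxOf c2 with
    | none =>
      rw [eOv_none_right c1 c2 (entry_of_box_none c2 hb2)]
      simp only [aOv, hb1, hb2]
    | some b2 =>
      have ha : aOv c1 c2 = boxesOverlap b1 b2 := by simp [aOv, hb1, hb2]
      rw [ha]
      have he1 := entry_of_box_some c1 b1 hb1
      have he2 := entry_of_box_some c2 b2 hb2
      by_cases hp1 : b1.1.1 ≤ b1.1.2 ∧ b1.2.1.1 ≤ b1.2.1.2 ∧ b1.2.2.1 ≤ b1.2.2.2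
      · by_cases hp2 : b2.1.1 ≤ b2.1.2 ∧ b2.2.1.1 ≤ b2.2.1.2 ∧ b2.2.2.1 ≤ b2.2.2.2
        · rw [if_pos hp1] at he1
          rw [if_pos hp2] at he2
          have : eOv c1 c2 = bOverlap
              (b1.1.1, b1.1.2, b1.2.1.1, b1.2.1.2, b1.2.2.1, b1.2.2.2)
              (b2.1.1, b2.1.2, b2.2.1.1, b2.2.1.2, b2.2.2.1, b2.2.2.2) := by
            simp [eOv, he1, he2]
          rw [this]
          simp [boxesOverlap, bOverlap]
        · rw [if_neg hp2] at he2
          rw [eOv_none_right c1 c2 he2]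
          cases hov : boxesOverlap b1 b2 with
          | false => rfl
          | true => exact absurd (bo_proper _ _ hov).2 hp2
      · rw [if_neg hp1] at he1
        rw [eOv_none_left c1 c2 he1]
        cases hov : boxesOverlap b1 b2 with
        | false => rfl
        | true => exact absurd (bo_proper _ _ hov).1 hp1

-- first-match lookup by key
def lk (k : Int) (l : List (Int × PBox)) : Option PBox :=
  (l.find? (fun p => p.1 == k)).map (·.2)

theorem lk_eq_none (k : Int) (l : List (Int × PBox)) (h : k ∉ l.map (·.1)) :
    lk k l = none := by
  unfold lk
  rw [List.find?_eq_none.mpr]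
  · rfl
  · intro p hp
    simp only [beq_iff_eq]
    intro e
    exact h (List.mem_map.mpr ⟨p, hp, e⟩)

theorem lk_eq_some (k : Int) (b : PBox) (l : List (Int × PBox))
    (hnd : (l.map (·.1)).Nodup) (h : (k, b) ∈ l) : lk k l = some b := by
  induction l with
  | nil => simp at h
  | cons p l ih =>
    simp only [List.map_cons, List.nodup_cons] at hnd
    rcases List.mem_cons.1 h with rfl | hm
    · simp [lk, List.find?]
    · have hpk : ¬ (p.1 == k) = true := by
        simp only [beq_iff_eq]
        intro e
        exact hnd.1 (List.mem_map.mpr ⟨(k, b), hm, e.symm ▸ rfl⟩)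
      simp only [lk, List.find?, hpk]
      exact ih hnd.2 hm

theorem mem_of_lk_some (k : Int) (b : PBox) (l : List (Int × PBox)) (h : lk k l = some b) :
    (k, b) ∈ l := by
  unfold lk at h
  cases hf : l.find? (fun p => p.1 == k) with
  | none => rw [hf] at h; simp at h
  | some p =>
    rw [hf] at h
    have hm := List.mem_of_find?_eq_some hf
    have hk := List.find?_some hf
    simp only [beq_iff_eq] at hk
    simp only [Option.map_some, Option.some.injEq] at h
    have : p = (k, b) := by
      cases p
      simp_all
    exact this ▸ hm

theorem lk_perm (k : Int) (l l' : List (Int × PBox)) (hnd : (l.map (·.1)).Nodup)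
    (hp : l.Perm l') : lk k l = lk k l' := by
  have hnd' : (l'.map (·.1)).Nodup := ((hp.map (·.1)).nodup_iff).mp hnd
  cases h : lk k l with
  | some b => exact (lk_eq_some k b l' hnd' (hp.mem_iff.mp (mem_of_lk_some k b l h))).symm
  | none =>
    cases h' : lk k l' with
    | none => rfl
    | some b =>
      have := mem_of_lk_some k b l' h'
      have hmem : (k, b) ∈ l := hp.mem_iff.mpr this
      rw [lk_eq_some k b l hnd hmem] at h
      exact h.symm

-- x-overlap consequences of the full test
theorem ov_xlo_le (b1 b2 : PBox) (h : bOverlap b1 b2 = true) : b2.1 ≤ b1.2.1 := by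
  simp only [bOverlap, Bool.and_eq_true, decide_eq_true_eq] at h
  exact le_trans (le_max_right b1.1 b2.1) (le_trans h.1.1 (min_le_left _ _))

theorem ov_false_of_lt (b1 b2 : PBox) (h : b1.2.1 < b2.1) : bOverlap b1 b2 = false := by
  cases hb : bOverlap b1 b2 with
  | false => rfl
  | true => exact absurd (ov_xlo_le b1 b2 hb) (not_le.mpr h)

theorem toNat_ne (a b : Int) (ha : 0 ≤ a) (hb : 0 ≤ b) (h : a ≠ b) : a.toNat ≠ b.toNat := by
  omega

-- the inner candidate loop of one sweep step
theorem innerB_len (e : Int × PBox) (act : List (Int × PBox)) (adj : List (List Int)) :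
    (act.foldl (fun adj p =>
      if bOverlap p.2 e.2 then
        let a1 := adj.set p.1.toNat (adj.getD p.1.toNat [] ++ [e.1])
        a1.set e.1.toNat (a1.getD e.1.toNat [] ++ [p.1])
      else adj) adj).length = adj.length := by
  induction act generalizing adj with
  | nil => rfl
  | cons p l ih =>
    rw [List.foldl_cons]
    by_cases h : bOverlap p.2 e.2 = true
    · simp only [h, if_pos]
      rw [ih]
      simp
    · rw [if_neg h]
      exact ih adj

theorem getD_set_self {α : Type} (l : List α) (i : Nat) (x d : α) (h : i < l.length) :
    (l.set i x).getD i d = x := by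
  simp [List.getD, h]

theorem getD_set_ne {α : Type} (l : List α) (i j : Nat) (x d : α) (h : j ≠ i) :
    (l.set i x).getD j d = l.getD j d := by
  simp [List.getD, List.getElem?_set_ne h.symm]

theorem innerB_getD (e : Int × PBox) (act : List (Int × PBox)) (adj : List (List Int))
    (hnd : (act.map (·.1)).Nodup) (hne : e.1 ∉ act.map (·.1))
    (hpos : 0 ≤ e.1 ∧ ∀ p ∈ act, 0 ≤ p.1)
    (hlen : e.1.toNat < adj.length ∧ ∀ p ∈ act, p.1.toNat < adj.length)
    (k : Int) (hk : 0 ≤ k) :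
    (act.foldl (fun adj p =>
      if bOverlap p.2 e.2 then
        let a1 := adj.set p.1.toNat (adj.getD p.1.toNat [] ++ [e.1])
        a1.set e.1.toNat (a1.getD e.1.toNat [] ++ [p.1])
      else adj) adj).getD k.toNat [] =
      if k = e.1 then adj.getD k.toNat [] ++ (act.filter (fun p => bOverlap p.2 e.2)).map (·.1)
      else
        match lk k act with
        | some bk => adj.getD k.toNat [] ++ (if bOverlap bk e.2 then [e.1] else [])
        | none => adj.getD k.toNat [] := by
  induction act generalizing adj with
  | nil =>
    simp only [List.foldl_nil, List.filter_nil, List.map_nil, List.append_nil, lk,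
      List.find?_nil, Option.map_none]
    split <;> rfl
  | cons p act ih =>
    have hpe : p.1 ≠ e.1 := fun h => hne (h ▸ List.mem_map.mpr ⟨p, by simp, rfl⟩)
    have hp0 : 0 ≤ p.1 := hpos.2 p (by simp)
    have hplen : p.1.toNat < adj.length := hlen.2 p (by simp)
    have hpn : p.1.toNat ≠ e.1.toNat := toNat_ne p.1 e.1 hp0 hpos.1 hpe
    simp only [List.map_cons, List.nodup_cons] at hnd
    have hne' : e.1 ∉ act.map (·.1) := fun h => hne (List.mem_cons_of_mem _ h)
    rw [List.foldl_cons]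
    by_cases hov : bOverlap p.2 e.2 = true
    · set adj' := ((adj.set p.1.toNat (adj.getD p.1.toNat [] ++ [e.1])).set e.1.toNat
        ((adj.set p.1.toNat (adj.getD p.1.toNat [] ++ [e.1])).getD e.1.toNat [] ++ [p.1]))
        with hadj'
      have hstep : (if bOverlap p.2 e.2 = true then
          let a1 := adj.set p.1.toNat (adj.getD p.1.toNat [] ++ [e.1])
          a1.set e.1.toNat (a1.getD e.1.toNat [] ++ [p.1])
        else adj) = adj' := by
        rw [if_pos hov]
      rw [hstep]
      have hlen' : adj'.length = adj.length := by
        rw [hadj']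
        simp
      have g_e : adj'.getD e.1.toNat [] = adj.getD e.1.toNat [] ++ [p.1] := by
        rw [hadj', getD_set_self _ _ _ _ (by simp; exact hlen.1),
          getD_set_ne _ _ _ _ _ (Ne.symm hpn)]
      have g_p : adj'.getD p.1.toNat [] = adj.getD p.1.toNat [] ++ [e.1] := by
        rw [hadj', getD_set_ne _ _ _ _ _ hpn, getD_set_self _ _ _ _ hplen]
      have g_o : ∀ m : Nat, m ≠ e.1.toNat → m ≠ p.1.toNat →
          adj'.getD m [] = adj.getD m [] := by
        intro m h1 h2
        rw [hadj', getD_set_ne _ _ _ _ _ h1, getD_set_ne _ _ _ _ _ h2]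
      rw [ih adj' hnd.2 hne' ⟨hpos.1, fun q hq => hpos.2 q (List.mem_cons_of_mem _ hq)⟩
        ⟨by rw [hlen']; exact hlen.1,
         fun q hq => by rw [hlen']; exact hlen.2 q (List.mem_cons_of_mem _ hq)⟩]
      by_cases hke : k = e.1
      · rw [if_pos hke, if_pos hke, hke, g_e, List.filter_cons, if_pos (by simpa using hov)]
        simp [List.append_assoc]
      · rw [if_neg hke, if_neg hke]
        by_cases hkp : k = p.1
        · have hlkc : lk k (p :: act) = some p.2 := by
            subst hkp
            unfold lk
            simp
          have hlkn : lk k act = none := lk_eq_none k act (fun h => hnd.1 (hkp ▸ h))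
          rw [hlkc, hlkn, hkp, g_p]
          simp [hov]
        · have hlk : lk k (p :: act) = lk k act := by
            have hbeq : (p.1 == k) = false :=
              beq_eq_false_iff_ne.mpr (fun h => hkp h.symm)
            unfold lk
            simp [hbeq]
          rw [hlk]
          have hgo : adj'.getD k.toNat [] = adj.getD k.toNat [] := by
            apply g_o
            · exact toNat_ne k e.1 hk hpos.1 hke
            · exact toNat_ne k p.1 hk hp0 hkp
          cases hlka : lk k act with
          | some bk => rw [hgo]
          | none => exact hgo
    · have hstep : (if bOverlap p.2 e.2 = true then
          let a1 := adj.set p.1.toNat (adj.getD p.1.toNat [] ++ [e.1])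
          a1.set e.1.toNat (a1.getD e.1.toNat [] ++ [p.1])
        else adj) = adj := by
        rw [if_neg hov]
      rw [hstep, ih adj hnd.2 hne' ⟨hpos.1, fun q hq => hpos.2 q (List.mem_cons_of_mem _ hq)⟩
        ⟨hlen.1, fun q hq => hlen.2 q (List.mem_cons_of_mem _ hq)⟩]
      by_cases hke : k = e.1
      · rw [if_pos hke, if_pos hke, List.filter_cons, if_neg (by simpa using hov)]
      · rw [if_neg hke, if_neg hke]
        by_cases hkp : k = p.1
        · have hlkc : lk k (p :: act) = some p.2 := by
            subst hkp
            unfold lk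
            simp
          have hlkn : lk k act = none := lk_eq_none k act (fun h => hnd.1 (hkp ▸ h))
          rw [hlkc, hlkn]
          simp [hov]
        · have hlk : lk k (p :: act) = lk k act := by
            have hbeq : (p.1 == k) = false :=
              beq_eq_false_iff_ne.mpr (fun h => hkp h.symm)
            unfold lk
            simp [hbeq]
          rw [hlk]

theorem key_unique (k : Int) (b b' : PBox) (l : List (Int × PBox))
    (hnd : (l.map (·.1)).Nodup) (h1 : (k, b) ∈ l) (h2 : (k, b') ∈ l) : b = b' := by
  have e1 := lk_eq_some k b l hnd h1
  have e2 := lk_eq_some k b' l hnd h2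
  rw [e1] at e2
  exact Option.some.inj e2

theorem lk_filter (k : Int) (l : List (Int × PBox)) (P : Int × PBox → Bool)
    (hnd : (l.map (·.1)).Nodup) :
    lk k (l.filter P) =
      match lk k l with
      | some b => if P (k, b) then some b else none
      | none => none := by
  have hndf : ((l.filter P).map (·.1)).Nodup :=
    hnd.sublist ((l.filter_sublist (p := P)).map (·.1))
  cases hlk : lk k l with
  | none =>
    apply lk_eq_none
    intro hmem
    obtain ⟨q, hq, hq1⟩ := List.mem_map.mp hmem
    have hql : q ∈ l := List.mem_of_mem_filter hq
    have : lk k l = some q.2 := lk_eq_some k q.2 l hnd (by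
      have : q = (k, q.2) := by
        cases q
        simp_all
      exact this ▸ hql)
    rw [hlk] at this
    exact absurd this (by simp)
  | some b =>
    have hmem : (k, b) ∈ l := mem_of_lk_some k b l hlk
    show lk k (List.filter P l) = if P (k, b) = true then some b else none
    by_cases hP : P (k, b) = true
    · rw [if_pos hP]
      exact lk_eq_some k b _ hndf (List.mem_filter.mpr ⟨hmem, hP⟩)
    · rw [if_neg hP]
      apply lk_eq_none
      intro hmemf
      obtain ⟨q, hq, hq1⟩ := List.mem_map.mp hmemf
      obtain ⟨hql, hqP⟩ := List.mem_filter.mp hq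
      have hq2 : q = (k, q.2) := by
        cases q
        simp_all
      have : q.2 = b := key_unique k q.2 b l hnd (hq2 ▸ hql) hmem
      rw [hq2, this] at hqP
      exact hP hqP

theorem lk_filter_none (k : Int) (l : List (Int × PBox)) (P : Int × PBox → Bool)
    (hnd : (l.map (·.1)).Nodup) (h : lk k l = none) : lk k (l.filter P) = none := by
  rw [lk_filter k l P hnd, h]

theorem lk_filter_some (k : Int) (b : PBox) (l : List (Int × PBox)) (P : Int × PBox → Bool)
    (hnd : (l.map (·.1)).Nodup) (h : lk k l = some b) :
    lk k (l.filter P) = if P (k, b) = true then some b else none := by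
  rw [lk_filter k l P hnd, h]

theorem lk_append (k : Int) (l1 l2 : List (Int × PBox)) :
    lk k (l1 ++ l2) = match lk k l1 with
      | some b => some b
      | none => lk k l2 := by
  unfold lk
  rw [List.find?_append]
  cases l1.find? (fun p => p.1 == k) <;> simp

theorem lk_singleton_self (e : Int × PBox) : lk e.1 [e] = some e.2 := by
  unfold lk
  simp

theorem lk_singleton_ne (k : Int) (e : Int × PBox) (h : k ≠ e.1) : lk k [e] = none := by
  unfold lk
  simp only [List.find?_singleton]
  have : (e.1 == k) = false := beq_eq_false_iff_ne.mpr (fun h' => h h'.symm)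
  simp [this]

-- one step of the sweep, then the full sweep characterized pointwise
theorem sweepB_getD (rest : List (Int × PBox)) (active : List (Int × PBox))
    (adj : List (List Int))
    (hs : rest.Pairwise (fun p q => p.2.1 ≤ q.2.1))
    (hnd : ((active ++ rest).map (·.1)).Nodup)
    (hpos : ∀ p ∈ active ++ rest, 0 ≤ p.1)
    (hlen : ∀ p ∈ active ++ rest, p.1.toNat < adj.length)
    (k : Int) (hk : 0 ≤ k) :
    ((rest.foldl sweepStep (active, adj)).2).getD k.toNat [] =
      adj.getD k.toNat []
      ++ (match lk k active with
          | some bk => (rest.filter (fun q => bOverlap bk q.2)).map (·.1)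
          | none => [])
      ++ (match lk k rest with
          | some bk => (active.filter (fun p => bOverlap p.2 bk)).map (·.1)
              ++ (rest.filter (fun q => decide (q.1 ≠ k) && bOverlap bk q.2)).map (·.1)
          | none => []) := by
  induction rest generalizing active adj with
  | nil =>
    have h3 : lk k ([] : List (Int × PBox)) = none := rfl
    rw [List.foldl_nil, h3]
    cases lk k active <;> simp
  | cons e rest ih =>
    -- structural facts about the keys
    have hndA : (active.map (·.1)).Nodup := by
      rw [List.map_append] at hnd
      exact hnd.of_append_left
    have hndER : (((e :: rest)).map (·.1)).Nodup := by
      rw [List.map_append] at hnd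
      exact hnd.of_append_right
    have hdisj : ∀ a ∈ active.map (·.1), a ∉ ((e :: rest)).map (·.1) := by
      rw [List.map_append] at hnd
      intro a ha
      exact (List.disjoint_of_nodup_append hnd) ha
    simp only [List.map_cons, List.nodup_cons] at hndER
    have heR : e.1 ∉ rest.map (·.1) := hndER.1
    have hndR : (rest.map (·.1)).Nodup := hndER.2
    have heA : e.1 ∉ active.map (·.1) := fun h => hdisj e.1 h (by simp)
    -- the sweep step
    set act1 := active.filter (fun p => decide (p.2.2.1 ≥ e.2.1)) with hact1
    set adj1 := act1.foldl (fun adj p =>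
      if bOverlap p.2 e.2 then
        let a1 := adj.set p.1.toNat (adj.getD p.1.toNat [] ++ [e.1])
        a1.set e.1.toNat (a1.getD e.1.toNat [] ++ [p.1])
      else adj) adj with hadj1
    have hfold : (e :: rest).foldl sweepStep (active, adj)
        = rest.foldl sweepStep (act1 ++ [e], adj1) := by
      rw [List.foldl_cons]
      rfl
    have hsubA : List.Sublist act1 active := List.filter_sublist
    have hsub : List.Sublist ((act1 ++ [e]) ++ rest) (active ++ e :: rest) := by
      rw [show active ++ e :: rest = (active ++ [e]) ++ rest by simp]
      exact (hsubA.append (List.Sublist.refl [e])).append (List.Sublist.refl rest)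
    have hndA1 : (act1.map (·.1)).Nodup := hndA.sublist (hsubA.map (·.1))
    have heA1 : e.1 ∉ act1.map (·.1) := fun h => heA ((hsubA.map (·.1)).mem h)
    have hposA1 : ∀ p ∈ act1, 0 ≤ p.1 := fun p hp =>
      hpos p (List.mem_append.mpr (Or.inl (hsubA.mem hp)))
    have hlenA1 : ∀ p ∈ act1, p.1.toNat < adj.length := fun p hp =>
      hlen p (List.mem_append.mpr (Or.inl (hsubA.mem hp)))
    have hpe : 0 ≤ e.1 := hpos e (by simp)
    have hle : e.1.toNat < adj.length := hlen e (by simp)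
    have hlen1 : adj1.length = adj.length := innerB_len e act1 adj
    have hse : ∀ q ∈ rest, e.2.1 ≤ q.2.1 := by
      intro q hq
      exact (List.pairwise_cons.mp hs).1 q hq
    -- apply the IH
    rw [hfold, ih (act1 ++ [e]) adj1 (List.pairwise_cons.mp hs).2
      (hnd.sublist (hsub.map (·.1)))
      (fun p hp => hpos p (hsub.subset hp))
      (fun p hp => by rw [hlen1]; exact hlen p (hsub.subset hp))]
    -- and the inner-loop characterization
    have hinner := innerB_getD e act1 adj hndA1 heA1 ⟨hpe, hposA1⟩ ⟨hle, hlenA1⟩ k hk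
    rw [← hadj1] at hinner
    by_cases hke : k = e.1
    · -- k is the newly processed entry
      rw [if_pos hke] at hinner
      have hlkA : lk k active = none := lk_eq_none k active (fun h => heA (hke ▸ h))
      have hlkR : lk k rest = none := lk_eq_none k rest (fun h => heR (hke ▸ h))
      have hlkA1 : lk k act1 = none := lk_filter_none k active _ hndA hlkA
      have hlkA1e : lk k (act1 ++ [e]) = some e.2 := by
        rw [lk_append, hlkA1, hke, lk_singleton_self]
      have hlkER : lk k (e :: rest) = some e.2 := by
        rw [show (e :: rest) = [e] ++ rest from rfl, lk_append, hke, lk_singleton_self]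
      have hactF : act1.filter (fun p => bOverlap p.2 e.2)
          = active.filter (fun p => bOverlap p.2 e.2) := by
        rw [hact1, List.filter_filter]
        apply List.filter_congr
        intro p hp
        cases hov : bOverlap p.2 e.2 with
        | false => simp
        | true =>
          have := ov_xlo_le p.2 e.2 hov
          simp only [ge_iff_le, this, decide_true, Bool.and_true]
      have hfe : List.filter (fun q => decide (q.1 ≠ k) && bOverlap e.2 q.2) (e :: rest)
          = rest.filter (fun q => bOverlap e.2 q.2) := by
        rw [List.filter_cons, if_neg (by simp [hke])]
        apply List.filter_congr
        intro q hq
        have : decide (q.1 ≠ k) = true := by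
          apply decide_eq_true
          intro h
          exact heR ((hke ▸ h) ▸ List.mem_map.mpr ⟨q, hq, rfl⟩)
        rw [this, Bool.true_and]
      simp only [hinner, hlkA, hlkA1e, hlkR, hlkER, hactF, hfe]
      simp [List.append_assoc]
    · -- k is not e
      rw [if_neg hke] at hinner
      have hlkE : lk k [e] = none := lk_singleton_ne k e hke
      have hlkER : lk k (e :: rest) = lk k rest := by
        rw [show (e :: rest) = [e] ++ rest from rfl, lk_append, hlkE]
      cases hlkA : lk k active with
      | some bk =>
        -- k was already active (or pruned); it is not in e :: rest
        have hkmem : (k, bk) ∈ active := mem_of_lk_some k bk active hlkA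
        have hkA : k ∈ active.map (·.1) := List.mem_map.mpr ⟨(k, bk), hkmem, rfl⟩
        have hlkR : lk k rest = none :=
          lk_eq_none k rest (fun h => hdisj k hkA (List.mem_cons_of_mem _ h))
        by_cases hsurv : e.2.1 ≤ bk.2.1
        · -- k survives the pruning
          have hlkA1 : lk k act1 = some bk := by
            rw [lk_filter_some k bk active _ hndA hlkA,
              if_pos (by simp only [decide_eq_true_eq]; exact hsurv)]
          have hlkA1e : lk k (act1 ++ [e]) = some bk := by
            rw [lk_append, hlkA1]
          simp only [hinner, hlkA1, hlkA1e, hlkER, hlkR, List.filter_cons]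
          by_cases hov : bOverlap bk e.2 = true
          · simp [hov, List.append_assoc]
          · simp [hov]
        · -- k was pruned: it overlaps nothing later
          have hlkA1 : lk k act1 = none := by
            rw [lk_filter_some k bk active _ hndA hlkA,
              if_neg (by simp only [decide_eq_true_eq]; exact hsurv)]
          have hlkA1e : lk k (act1 ++ [e]) = none := by
            rw [lk_append, hlkA1, hlkE]
          have hnone : List.filter (fun q => bOverlap bk q.2) (e :: rest) = [] := by
            apply List.filter_eq_nil_iff.mpr
            intro q hq
            have hlt : bk.2.1 < q.2.1 := by
              rcases List.mem_cons.mp hq with rfl | hqr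
              · omega
              · have := hse q hqr
                omega
            simp [ov_false_of_lt bk q.2 hlt]
          simp only [hinner, hlkA1, hlkA1e, hlkER, hlkR, hnone]
          simp
      | none =>
        have hkA : k ∉ active.map (·.1) := by
          intro h
          obtain ⟨p, hp, hp1⟩ := List.mem_map.mp h
          have hpk : p = (k, p.2) := by
            rw [← hp1]
          rw [lk_eq_some k p.2 active hndA (hpk ▸ hp)] at hlkA
          exact absurd hlkA (by simp)
        have hlkA1 : lk k act1 = none := lk_filter_none k active _ hndA hlkA
        have hlkA1e : lk k (act1 ++ [e]) = none := by
          rw [lk_append, hlkA1, hlkE]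
        cases hlkR : lk k rest with
        | none => simp only [hinner, hlkA1, hlkA1e, hlkER, hlkR]
        | some bk =>
          -- k comes later in the sweep
          have hkr : (k, bk) ∈ rest := mem_of_lk_some k bk rest hlkR
          have hebk : e.2.1 ≤ bk.1 := hse (k, bk) hkr
          have hactF : act1.filter (fun p => bOverlap p.2 bk)
              = active.filter (fun p => bOverlap p.2 bk) := by
            rw [hact1, List.filter_filter]
            apply List.filter_congr
            intro p hp
            cases hov : bOverlap p.2 bk with
            | false => simp
            | true =>
              have h1 := ov_xlo_le p.2 bk hov
              have h2 : decide (p.2.2.1 ≥ e.2.1) = true := decide_eq_true (by omega)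
              rw [h2, Bool.and_true]
          have hfilt1 : (act1 ++ [e]).filter (fun p => bOverlap p.2 bk)
              = active.filter (fun p => bOverlap p.2 bk)
                ++ (if bOverlap bk e.2 then [e] else []) := by
            rw [List.filter_append, hactF]
            congr 1
            rw [List.filter_cons, bOverlap_comm e.2 bk]
            by_cases hov : bOverlap bk e.2 = true
            · rw [if_pos hov, if_pos hov]
              rfl
            · rw [if_neg hov, if_neg hov]
              rfl
          have hfe : List.filter (fun q => decide (q.1 ≠ k) && bOverlap bk q.2) (e :: rest)
              = (if bOverlap bk e.2 then [e] else [])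
                ++ rest.filter (fun q => decide (q.1 ≠ k) && bOverlap bk q.2) := by
            rw [List.filter_cons]
            have hek : decide (e.1 ≠ k) = true := decide_eq_true (fun h => hke h.symm)
            rw [hek, Bool.true_and]
            by_cases hov : bOverlap bk e.2 = true
            · rw [if_pos hov, if_pos hov]
              rfl
            · rw [if_neg hov, if_neg hov]
              rfl
          simp only [hinner, hlkA1, hlkA1e, hlkER, hlkR, hfilt1, hfe,
            List.map_append]
          simp [List.append_assoc]

-- === the entry list: a filterMap over the enumeration, keys a filter of the range ===
theorem entries_fold_eq (l : List (Int × List (List Int))) (acc : List (Int × PBox)) :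
    l.foldl (fun es p =>
      match entryOfB p.2 with
      | some b => es ++ [(p.1, b)]
      | none => es) acc
    = acc ++ l.filterMap (fun p => (entryOfB p.2).map (fun b => (p.1, b))) := by
  induction l generalizing acc with
  | nil => simp
  | cons p l ih =>
    rw [List.foldl_cons]
    cases hE : entryOfB p.2 with
    | none => simp [hE, ih]
    | some b => simp [hE, ih]

theorem keys_filterMap (F : Int → Option PBox) (l : List Int) :
    (l.filterMap (fun j => (F j).map (fun b => (j, b)))).map (·.1)
      = l.filter (fun j => (F j).isSome) := by
  induction l with
  | nil => simp
  | cons j l ih =>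
    cases hF : F j with
    | none => simp [hF, ih]
    | some b => simp [hF, ih]

theorem lk_filterMap (F : Int → Option PBox) (l : List Int) (hnd : l.Nodup) (j : Int)
    (hj : j ∈ l) :
    lk j (l.filterMap (fun i => (F i).map (fun b => (i, b)))) = F j := by
  have hkeys := keys_filterMap F l
  have hndk : ((l.filterMap (fun i => (F i).map (fun b => (i, b)))).map (·.1)).Nodup := by
    rw [hkeys]
    exact hnd.filter _
  cases hF : F j with
  | some b =>
    apply lk_eq_some _ _ _ hndk
    exact List.mem_filterMap.mpr ⟨j, hj, by simp [hF]⟩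
  | none =>
    apply lk_eq_none
    rw [hkeys]
    intro hmem
    have := (List.mem_filter.mp hmem).2
    rw [hF] at this
    simp at this

theorem fm_filter_map (F : Int → Option PBox) (P : Int × PBox → Bool) (l : List Int) :
    (((l.filterMap (fun j => (F j).map (fun b => (j, b)))).filter P).map (·.1))
      = l.filter (fun j => match F j with | some b => P (j, b) | none => false) := by
  induction l with
  | nil => simp
  | cons j l ih =>
    cases hF : F j with
    | none => simp [hF, ih]
    | some b =>
      simp only [List.filterMap_cons, hF, Option.map_some, List.filter_cons]
      by_cases hP : P (j, b) = true
      · simp [hP, ih]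
      · simp [hP, ih]

theorem mem_entries_key (F : Int → Option PBox) (l : List Int) (p : Int × PBox)
    (h : p ∈ l.filterMap (fun j => (F j).map (fun b => (j, b)))) : p.1 ∈ l := by
  obtain ⟨j, hj, hmap⟩ := List.mem_filterMap.mp h
  cases hF : F j with
  | none => rw [hF] at hmap; simp at hmap
  | some b =>
    rw [hF] at hmap
    simp only [Option.map_some, Option.some.injEq] at hmap
    rw [← hmap]
    exact hj

theorem getD_replicate_nil (n i : Nat) : (List.replicate n ([] : List Int)).getD i [] = [] := by
  rcases Nat.lt_or_ge i n with h | h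
  · simp [List.getD, h]
  · simp [List.getD, Nat.not_lt.mpr h]

theorem sorted_nil_int :
    PySem.List.sorted ([] : List Int) (fun x => x) false = [] := rfl

theorem AVal_pairwise (cubes : List (List (List Int))) (k : Int) :
    (AVal cubes k).Pairwise (· < ·) := by
  unfold AVal
  apply List.Pairwise.sublist (List.filter_sublist)
  rw [PySem.List.len_eq, PySem.List.pyRange_zero_natCast]
  exact (List.pairwise_lt_range).map _ (fun a b h => Int.ofNat_lt.mpr h)

theorem B_char (cubes : List (List (List Int))) :
    findIntersects_alt cubes =
      (PySem.List.pyRange 0 (PySem.List.len cubes)).map (fun k =>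
        (k, PySem.List.sorted (PySem.List.pyGetD
          (((PySem.List.sorted
              ((PySem.List.enumerate cubes).foldl (fun es p =>
                match entryOfB p.2 with
                | some b => es ++ [(p.1, b)]
                | none => es) [])
              (fun e => e.2.1) false).foldl sweepStep
            ([], List.replicate cubes.length [])).2) k []) (fun x => x) false)) := by
  have hfresh : ∀ a ∈ PySem.List.pyRange 0 (PySem.List.len cubes),
      (PySem.Dict.empty : PySem.Dict Int (List Int)).contains a = false := fun a _ => by simp
  have hnd : (PySem.List.pyRange 0 (PySem.List.len cubes)).Nodup :=
    PySem.List.nodup_pyRange_one 0 _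
  simpa using PySem.Dict.items_foldl_insert_fresh (PySem.List.pyRange 0 (PySem.List.len cubes))
    (fun x => x)
    (fun k => PySem.List.sorted (PySem.List.pyGetD
      (((PySem.List.sorted
          ((PySem.List.enumerate cubes).foldl (fun es p =>
            match entryOfB p.2 with
            | some b => es ++ [(p.1, b)]
            | none => es) [])
          (fun e => e.2.1) false).foldl sweepStep
        ([], List.replicate cubes.length [])).2) k []) (fun x => x) false)
    PySem.Dict.empty hfresh (by simpa using hnd)

-- ===== VERDICT (by name: the statement is the Claim_ definition above) =====
theorem findIntersects_spec : Claim_equal_findIntersects := by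
  intro cubes _ hPre
  unfold Spec_findIntersects
  rw [A_char cubes hPre, B_char cubes]
  apply List.map_congr_left
  intro k hk
  obtain ⟨hk0, hkn⟩ := PySem.List.mem_pyRange_one.mp hk
  rw [PySem.List.len_eq] at hkn
  congr 1
  -- the entry list, its sorted version, and their key structure
  set F : Int → Option PBox := fun j => entryOfB (PySem.List.pyGetD cubes j []) with hF
  have hrange_nd : (PySem.List.pyRange 0 (PySem.List.len cubes)).Nodup :=
    PySem.List.nodup_pyRange_one 0 _
  have hentries : (PySem.List.enumerate cubes).foldl (fun es p =>
        match entryOfB p.2 with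
        | some b => es ++ [(p.1, b)]
        | none => es) []
      = (PySem.List.pyRange 0 (PySem.List.len cubes)).filterMap
          (fun j => (F j).map (fun b => (j, b))) := by
    rw [entries_fold_eq, PySem.List.enumerate_eq_map_pyRange cubes ([] : List (List Int)),
      List.filterMap_map]
    rfl
  set entries := (PySem.List.pyRange 0 (PySem.List.len cubes)).filterMap
      (fun j => (F j).map (fun b => (j, b))) with hEdef
  rw [hentries]
  set entriesS := PySem.List.sorted entries (fun e => e.2.1) false with hSdef
  have hperm : entriesS.Perm entries := PySem.List.sorted_perm entries (fun e => e.2.1) false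
  have hnd_entries : (entries.map (·.1)).Nodup := by
    rw [hEdef, keys_filterMap]
    exact hrange_nd.filter _
  have hndS : (entriesS.map (·.1)).Nodup := ((hperm.map (·.1)).nodup_iff).mpr hnd_entries
  have hsorted : entriesS.Pairwise (fun p q => p.2.1 ≤ q.2.1) :=
    PySem.List.sorted_pairwise entries (fun e => e.2.1)
  have hmemS : ∀ p ∈ entriesS, p.1 ∈ PySem.List.pyRange 0 (PySem.List.len cubes) := by
    intro p hp
    exact mem_entries_key F _ p (hperm.mem_iff.mp hp)
  have hposS : ∀ p ∈ ([] : List (Int × PBox)) ++ entriesS, 0 ≤ p.1 := by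
    intro p hp
    rw [List.nil_append] at hp
    exact (PySem.List.mem_pyRange_one.mp (hmemS p hp)).1
  have hlenS : ∀ p ∈ ([] : List (Int × PBox)) ++ entriesS,
      p.1.toNat < (List.replicate cubes.length ([] : List Int)).length := by
    intro p hp
    rw [List.nil_append] at hp
    obtain ⟨h1, h2⟩ := PySem.List.mem_pyRange_one.mp (hmemS p hp)
    rw [PySem.List.len_eq] at h2
    rw [List.length_replicate]
    omega
  have hsw := sweepB_getD entriesS [] (List.replicate cubes.length ([] : List Int)) hsorted
    (by simpa using hndS) hposS hlenS k hk0
  have hpg : PySem.List.pyGetD ((entriesS.foldl sweepStep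
        ([], List.replicate cubes.length ([] : List Int))).2) k []
      = ((entriesS.foldl sweepStep
        ([], List.replicate cubes.length ([] : List Int))).2).getD k.toNat [] := by
    rw [show k = ((k.toNat : Nat) : Int) by omega, PySem.List.pyGetD_natCast]
    simp only [Int.toNat_natCast]
  have hlk0 : lk k ([] : List (Int × PBox)) = none := rfl
  have hlkS : lk k entriesS = F k := by
    rw [lk_perm k entriesS entries hndS hperm, hEdef,
      lk_filterMap F _ hrange_nd k hk]
  rw [hpg, hsw, hlk0, getD_replicate_nil]
  cases hFk : F k with
  | none =>
    have hAval : AVal cubes k = [] := by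
      unfold AVal
      apply List.filter_eq_nil_iff.mpr
      intro j hj
      rw [aOv_eq_eOv, eOv_none_left _ _ hFk]
      simp
    rw [hAval, hlkS, hFk]
    exact (sorted_nil_int).symm
  | some bk =>
    rw [hlkS, hFk]
    simp only [List.filter_nil, List.map_nil, List.nil_append, List.append_nil]
    have hAval : AVal cubes k
        = ((entries.filter (fun q => decide (q.1 ≠ k) && bOverlap bk q.2)).map (·.1)) := by
      unfold AVal
      rw [hEdef, fm_filter_map F _ _]
      apply List.filter_congr
      intro j hj
      rw [aOv_eq_eOv]
      unfold eOv
      rw [show entryOfB (PySem.List.pyGetD cubes k []) = some bk from hFk]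
      cases hFj : entryOfB (PySem.List.pyGetD cubes j []) with
      | none =>
        rw [show F j = none from hFj]
        simp
      | some b =>
        rw [show F j = some b from hFj]
        have : decide (k ≠ j) = decide (j ≠ k) := by
          apply decide_eq_decide.mpr
          constructor
          · exact fun h e => h e.symm
          · exact fun h e => h e.symm
        rw [this]
    have hpermF : (AVal cubes k).Perm
        ((entriesS.filter (fun q => decide (q.1 ≠ k) && bOverlap bk q.2)).map (·.1)) := by
      rw [hAval]
      exact ((hperm.filter _).map _).symm
    exact (PySem.List.sorted_eq_of_perm_of_pairwise_lt _ _ (fun x => x) hpermF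
      (AVal_pairwise cubes k)).symm
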